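-- pv_equiv track=rewrite | github.com/STkangyh/Algorithm_Practice | 2. 문자열과 해시/파이썬 기본 코드/최빈값구하기.py | solution
-- ===== SOURCE A (Python) =====
-- from collections import Counter
--
-- def solution(array):
--     answer = 0
--     sH = Counter(array)
--     maxList=[]
--     for key in sH:
--         if sH[key]>answer:
--             answer = sH[key]
--
--     for key in sH:
--         if sH[key]==answer:
--             maxList.append(key)
--
--     return -1 if len(maxList)>1 else maxList[0]
-- ===== SOURCE B (Python) =====
-- def solution(array):
--     counts = {}
--     for x in array:
--         counts[x] = counts.get(x, 0) + 1
--     best_key = None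
--     best_count = 0
--     tie = False
--     for k, c in counts.items():
--         if c > best_count:
--             best_key, best_count, tie = k, c, False
--         elif c == best_count:
--             tie = True
--     return -1 if tie else best_key
-- ===== Notes on version B (the rewrite author's own statement) =====
-- stated objective: alternative
-- what changed: Instead of A's two separate passes over the counter (one to find the max count, one to build the list of all keys attaining it and then test its length), B makes a single pass over the counts keeping (best_key, best_count, tie-flag), so no max-key list is ever materialised.
-- outside the precondition, e.g. on solution([]): A raises IndexError, B returns None
import Mathlib
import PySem

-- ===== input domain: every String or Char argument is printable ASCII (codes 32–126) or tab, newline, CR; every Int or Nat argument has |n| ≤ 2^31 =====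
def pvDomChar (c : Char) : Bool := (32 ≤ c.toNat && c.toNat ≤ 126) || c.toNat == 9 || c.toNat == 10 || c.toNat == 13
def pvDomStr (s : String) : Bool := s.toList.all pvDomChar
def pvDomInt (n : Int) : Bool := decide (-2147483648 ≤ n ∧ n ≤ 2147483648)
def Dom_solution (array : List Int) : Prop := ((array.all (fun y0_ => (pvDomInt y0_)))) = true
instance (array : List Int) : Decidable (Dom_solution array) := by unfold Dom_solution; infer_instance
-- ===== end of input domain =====

-- B replaces A's two passes over the counter (max count, then the list of all keys attaining it)
-- by one pass keeping (best key, best count, tie flag); same value everywhere A returns.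

-- ===== PORT A =====
def solution (array : List Int) : Int :=
  let sH := PySem.Dict.counter array
  let answer := sH.keys.foldl (fun answer key => if sH.getD key 0 > answer then sH.getD key 0 else answer) (0 : Int)
  let maxList := sH.keys.foldl (fun l key => if sH.getD key 0 = answer then l ++ [key] else l) ([] : List Int)
  if maxList.length > 1 then -1 else (PySem.List.pyGet? maxList 0).getD 0  -- maxList[0]: none = IndexError, excluded by Pre_

-- ===== PORT B =====
def solution_alt (array : List Int) : Int :=
  let counts := array.foldl (fun d x => d.insert x (d.getD x 0 + 1)) (PySem.Dict.empty : PySem.Dict Int Int)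
  let st := counts.items.foldl
    (fun (st : Int × Int × Bool) kc =>
      if kc.2 > st.2.1 then (kc.1, kc.2, false)
      else if kc.2 = st.2.1 then (st.1, st.2.1, true)
      else st) ((0 : Int), (0 : Int), false)
  if st.2.2 then -1 else st.1

-- ===== PRECONDITION & SPEC =====
-- Pre_ excludes only the empty list, on which A raises IndexError (maxList[0] on an empty list).
def Pre_solution (array : List Int) : Prop := array ≠ []
instance (array : List Int) : Decidable (Pre_solution array) := by unfold Pre_solution; infer_instance
def pvWitness_solution : List Int := [1, 2, 2]

def Spec_solution (array : List Int) (out : Int) : Prop := out = solution_alt array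
instance (array : List Int) (out : Int) : Decidable (Spec_solution array out) := by unfold Spec_solution; infer_instance

-- ===== CLAIM (what is proved, stated in full; the proofs are below) =====
def Claim_equal_solution : Prop := ∀ (array : List Int), Dom_solution array → Pre_solution array → Spec_solution array (solution array)

-- ===== LEMMAS AND PROOFS =====

-- the count function, max of counts over the keys, the keys attaining the max, and B's one-pass step
def pvMax (c : Int → Int) (l : List Int) : Int := l.foldl (fun a k => if c k > a then c k else a) 0
def pvF (c : Int → Int) (l : List Int) : List Int := l.filter (fun k => decide (c k = pvMax c l))
def pvStep (c : Int → Int) (st : Int × Int × Bool) (k : Int) : Int × Int × Bool :=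
  if c k > st.2.1 then (k, c k, false) else if c k = st.2.1 then (st.1, st.2.1, true) else st

theorem pvMax_append (c : Int → Int) (l : List Int) (x : Int) :
    pvMax c (l ++ [x]) = if c x > pvMax c l then c x else pvMax c l := by
  simp [pvMax, List.foldl_append]

theorem pvMax_nonneg (c : Int → Int) (l : List Int) : 0 ≤ pvMax c l := by
  induction l using List.reverseRecOn with
  | nil => simp [pvMax]
  | append_singleton l x ih =>
    rw [pvMax_append]; split <;> omega

theorem le_pvMax (c : Int → Int) (l : List Int) (k : Int) (hk : k ∈ l) : c k ≤ pvMax c l := by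
  induction l using List.reverseRecOn with
  | nil => simp at hk
  | append_singleton l x ih =>
    rw [pvMax_append]
    rcases List.mem_append.1 hk with h | h
    · have := ih h; split <;> omega
    · simp at h; subst h; split <;> omega

theorem pvMain (c : Int → Int) (l : List Int) (hpos : ∀ k ∈ l, 0 < c k) :
    l.foldl (pvStep c) ((0 : Int), (0 : Int), false)
      = ((pvF c l).headD 0, pvMax c l, decide (2 ≤ (pvF c l).length))
    ∧ (l ≠ [] → pvF c l ≠ []) := by
  induction l using List.reverseRecOn with
  | nil => simp [pvF, pvMax]
  | append_singleton l x ih =>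
    have hpos' : ∀ k ∈ l, 0 < c k := fun k hk => hpos k (List.mem_append.2 (Or.inl hk))
    have hx : 0 < c x := hpos x (by simp)
    obtain ⟨ihf, ihne⟩ := ih hpos'
    have hM := pvMax_append c l x
    rw [List.foldl_append, List.foldl_cons, List.foldl_nil, ihf]
    by_cases h1 : c x > pvMax c l
    · -- new strict maximum: old keys cannot attain it
      have hMx : pvMax c (l ++ [x]) = c x := by rw [hM]; simp [h1]
      have hFl : l.filter (fun k => decide (c k = c x)) = [] := by
        rw [List.filter_eq_nil_iff]
        intro k hk
        have := le_pvMax c l k hk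
        simp only [decide_eq_true_eq]
        omega
      have hF : pvF c (l ++ [x]) = [x] := by
        simp [pvF, List.filter_append, hMx, hFl]
      constructor
      · rw [hF, hMx]; simp [pvStep, h1]
      · intro _; simp [hF]
    · by_cases h2 : c x = pvMax c l
      · -- equals the current maximum: a tie appears (l ≠ [] here since pvMax [] = 0 < c x)
        have hlne : l ≠ [] := by
          rintro rfl; simp [pvMax] at h2; omega
        have hMx : pvMax c (l ++ [x]) = pvMax c l := by rw [hM]; simp [h1]
        have hF : pvF c (l ++ [x]) = pvF c l ++ [x] := by
          simp [pvF, List.filter_append, hMx, h2]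
        have hFne := ihne hlne
        constructor
        · rw [hF, hMx]
          have h1l : 1 ≤ (pvF c l).length := by
            rcases List.exists_cons_of_ne_nil hFne with ⟨a, t, ha⟩
            simp [ha]
          have hhd : (pvF c l ++ [x]).headD 0 = (pvF c l).headD 0 := by
            rcases List.exists_cons_of_ne_nil hFne with ⟨a, t, ha⟩
            simp [ha]
          rw [hhd]
          simp [pvStep, h2, h1l]
        · intro _; simp [hF]
      · -- below the maximum: nothing changes
        have hMx : pvMax c (l ++ [x]) = pvMax c l := by rw [hM]; simp [h1]
        have hF : pvF c (l ++ [x]) = pvF c l := by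
          simp only [pvF, List.filter_append, hMx]
          have : c x ≠ pvMax c l := h2
          simp [this]
        constructor
        · rw [hF, hMx]; simp [pvStep, h1, h2]
        · intro _
          have hlne : l ≠ [] := by
            rintro rfl
            have := pvMax_nonneg c ([] : List Int)
            simp [pvMax] at h1 ⊢
            omega
          rw [hF]; exact ihne hlne

-- ===== VERDICT (by name: the statement is the Claim_ definition above) =====
theorem solution_spec : Claim_equal_solution := by
  intro array _ hpre
  unfold Spec_solution solution solution_alt
  simp only [PySem.Dict.foldl_insert_getD_add_one_eq_counter, PySem.Dict.items_counter,
    PySem.Dict.keys_counter, PySem.Dict.getD_counter, List.foldl_map]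
  set ks := PySem.Set.ofList array with hks
  set c : Int → Int := fun k => ((array.count k : Nat) : Int) with hc
  have hpos : ∀ k ∈ ks, 0 < c k := by
    intro k hk
    have : k ∈ array := (PySem.Set.mem_ofList array k).1 hk
    have := List.count_pos_iff.2 this
    simp [hc]; omega
  have hksne : ks ≠ [] := by
    rcases List.exists_cons_of_ne_nil hpre with ⟨a, t, ha⟩
    intro h
    have : a ∈ ks := (PySem.Set.mem_ofList array a).2 (by simp [ha])
    simp [h] at this
  obtain ⟨hfold, hne⟩ := pvMain c ks hpos
  have hFne := hne hksne
  have hstep : (ks.foldl (fun (st : Int × Int × Bool) k =>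
      if c k > st.2.1 then (k, c k, false)
      else if c k = st.2.1 then (st.1, st.2.1, true) else st) ((0:Int),(0:Int),false))
      = ((pvF c ks).headD 0, pvMax c ks, decide (2 ≤ (pvF c ks).length)) := hfold
  have hmax : ks.foldl (fun a k => if c k > a then c k else a) 0 = pvMax c ks := rfl
  have hfilter : ks.foldl (fun l k => if c k = pvMax c ks then l ++ [k] else l) ([] : List Int)
      = pvF c ks := by
    have := PySem.List.foldl_append_if (fun k => decide (c k = pvMax c ks)) (fun k => k) ks []
    simpa [pvF, List.map_id] using this
  rw [hmax, hfilter, hstep]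
  rcases List.exists_cons_of_ne_nil hFne with ⟨a, t, hFa⟩
  by_cases hlen : 2 ≤ (pvF c ks).length
  · have : (pvF c ks).length > 1 := by omega
    simp [this, hlen]
  · have ht : t = [] := by
      rcases t with _ | _ <;> simp_all
    subst ht
    simp [hFa, PySem.List.pyGet?, PySem.List.pyIdx?]
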